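-- pv_equiv track=rewrite | github.com/diegofornalha/backend-rag-ia | backend-rag-ia/services/md_converter.py | extract_content_from_md
-- ===== SOURCE A (Python) =====
-- def extract_content_from_md(md_content):
--     """Extrai conteúdo estruturado do markdown."""
--     lines = md_content.strip().split("\n")
--     sections = []
--     current_section = []
--     current_title = ""
--
--     for line in lines:
--         if line.startswith("#"):
--             if current_section:
--                 sections.append((current_title, "\n".join(current_section)))
--                 current_section = []
--             current_title = line.strip("# ").strip()
--         elif line.strip():
--             current_section.append(line.strip())
--
--     if current_section:
--         sections.append((current_title, "\n".join(current_section)))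
--
--     return sections
-- ===== SOURCE B (Python) =====
-- def _split_at_header(lines):
--     """(body, rest): body = lines before the first header line, rest starts at that header (or empty)."""
--     for i, ln in enumerate(lines):
--         if ln.startswith("#"):
--             return lines[:i], lines[i:]
--     return lines, []
--
--
-- def _emit(title, body):
--     content = "\n".join(l.strip() for l in body if l.strip())
--     return [(title, content)] if content else []
--
--
-- def _sections(title, lines):
--     body, rest = _split_at_header(lines)
--     out = _emit(title, body)
--     if rest:
--         return out + _sections(rest[0].strip("# ").strip(), rest[1:])
--     return out
--
--
-- def extract_content_from_md(md_content):
--     """Extrai conteúdo estruturado do markdown."""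
--     return _sections("", md_content.strip().split("\n"))
-- ===== Notes on version B (the rewrite author's own statement) =====
-- stated objective: alternative
-- what changed: Replaced the flat flush-on-header accumulator loop by a split-first decomposition: recursively cut the line list at the first header line and process each (title, body) chunk independently.
import Mathlib
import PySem

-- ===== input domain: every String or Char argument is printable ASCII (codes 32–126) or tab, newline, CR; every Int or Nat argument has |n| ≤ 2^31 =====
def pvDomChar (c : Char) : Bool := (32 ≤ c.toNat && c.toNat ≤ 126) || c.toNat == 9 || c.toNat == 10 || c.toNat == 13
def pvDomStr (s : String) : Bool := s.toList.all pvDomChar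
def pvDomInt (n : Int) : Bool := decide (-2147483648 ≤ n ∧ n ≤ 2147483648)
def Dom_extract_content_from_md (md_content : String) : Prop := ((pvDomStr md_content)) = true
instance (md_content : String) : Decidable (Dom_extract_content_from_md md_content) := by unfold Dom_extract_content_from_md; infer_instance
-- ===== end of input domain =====

-- B replaces A's flat flush-on-header accumulator loop by a split-first decomposition:
-- recursively cut the line list at the first header and emit each (title, body) chunk; same cost (objective: alternative).


-- ===== PORT A =====
-- state = (sections, current_section, current_title); flush appends the pending section
def pvStepA (st : List (String × String) × List String × String) (line : String) :
    List (String × String) × List String × String :=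
  if PySem.Str.startswith line "#" then
    ((if st.2.1 ≠ [] then st.1 ++ [(st.2.2, PySem.Str.join "\n" st.2.1)] else st.1),
     [], PySem.Str.strip (PySem.Str.stripChars line "# "))
  else if PySem.Str.strip line ≠ "" then
    (st.1, st.2.1 ++ [PySem.Str.strip line], st.2.2)
  else st

def extract_content_from_md (md_content : String) : List (String × String) :=
  let lines := (PySem.Str.split? (PySem.Str.strip md_content) "\n").getD []
  let st := lines.foldl pvStepA ([], [], "")
  if st.2.1 ≠ [] then st.1 ++ [(st.2.2, PySem.Str.join "\n" st.2.1)] else st.1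

-- ===== PORT B =====
-- _split_at_header: lines before the first header, and the rest from that header on
def pvSplitAtHeader : List String → List String × List String
  | [] => ([], [])
  | l :: ls =>
    if PySem.Str.startswith l "#" then ([], l :: ls)
    else
      let p := pvSplitAtHeader ls
      (l :: p.1, p.2)

-- _emit
def pvEmit (title : String) (body : List String) : List (String × String) :=
  let content := PySem.Str.join "\n" (((body.map PySem.Str.strip).filter (fun s => s ≠ "")))
  if content ≠ "" then [(title, content)] else []

theorem pvSplitAtHeader_snd_length_le (ls : List String) :
    (pvSplitAtHeader ls).2.length ≤ ls.length := by
  induction ls with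
  | nil => simp [pvSplitAtHeader]
  | cons l ls ih =>
    simp only [pvSplitAtHeader]
    split
    · simp
    · simpa using Nat.le_succ_of_le ih

-- _sections
def pvSections (title : String) (lines : List String) : List (String × String) :=
  let p := pvSplitAtHeader lines
  let out := pvEmit title p.1
  match hrest : p.2 with
  | [] => out
  | hd :: t => out ++ pvSections (PySem.Str.strip (PySem.Str.stripChars hd "# ")) t
termination_by lines.length
decreasing_by
  have := pvSplitAtHeader_snd_length_le lines
  rw [hrest] at this
  simpa using Nat.lt_of_lt_of_le (Nat.lt_succ_self _) this

def extract_content_from_md_alt (md_content : String) : List (String × String) :=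
  pvSections "" ((PySem.Str.split? (PySem.Str.strip md_content) "\n").getD [])

-- ===== PRECONDITION & SPEC =====
def Spec_extract_content_from_md (md_content : String) (out : List (String × String)) : Prop := out = extract_content_from_md_alt md_content
instance (md_content : String) (out : List (String × String)) : Decidable (Spec_extract_content_from_md md_content out) := by unfold Spec_extract_content_from_md; infer_instance

-- ===== CLAIM (what is proved, stated in full; the proofs are below) =====
def Claim_equal_extract_content_from_md : Prop := ∀ (md_content : String), Dom_extract_content_from_md md_content → Spec_extract_content_from_md md_content (extract_content_from_md md_content)

-- ===== LEMMAS AND PROOFS =====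

-- proof-side: the "flush the pending section" step shared by both sides
def pvFlush (title : String) (cs : List String) : List (String × String) :=
  if cs ≠ [] then [(title, PySem.Str.join "\n" cs)] else []

theorem pvFlush_append (secs : List (String × String)) (cur : List String) (title : String) :
    (if cur ≠ [] then secs ++ [(title, PySem.Str.join "\n" cur)] else secs)
      = secs ++ pvFlush title cur := by
  unfold pvFlush; split <;> simp

-- proof-side: A's loop continued from a pending section, written as structural recursion
def pvG (cur : List String) (title : String) : List String → List (String × String)
  | [] => pvFlush title cur
  | l :: ls =>
    if PySem.Str.startswith l "#" then
      pvFlush title cur ++ pvG [] (PySem.Str.strip (PySem.Str.stripChars l "# ")) ls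
    else if PySem.Str.strip l ≠ "" then pvG (cur ++ [PySem.Str.strip l]) title ls
    else pvG cur title ls

theorem pvA_loop (lines : List String) :
    ∀ (secs : List (String × String)) (cur : List String) (title : String),
      (if (lines.foldl pvStepA (secs, cur, title)).2.1 ≠ [] then
        (lines.foldl pvStepA (secs, cur, title)).1 ++
          [((lines.foldl pvStepA (secs, cur, title)).2.2,
            PySem.Str.join "\n" (lines.foldl pvStepA (secs, cur, title)).2.1)]
       else (lines.foldl pvStepA (secs, cur, title)).1)
      = secs ++ pvG cur title lines := by
  induction lines with
  | nil =>
    intro secs cur title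
    simpa only [List.foldl_nil, pvG] using pvFlush_append secs cur title
  | cons l ls ih =>
    intro secs cur title
    simp only [List.foldl_cons, pvStepA, pvG]
    by_cases h1 : PySem.Str.startswith l "#"
    · rw [if_pos h1, if_pos h1, ih, pvFlush_append, List.append_assoc]
    · rw [if_neg h1, if_neg h1]
      by_cases h2 : PySem.Str.strip l ≠ ""
      · rw [if_pos h2, if_pos h2]; exact ih _ _ _
      · rw [if_neg h2, if_neg h2]; exact ih _ _ _

theorem pvG_split (lines : List String) :
    ∀ (cur : List String) (title : String),
      pvG cur title lines =
        pvFlush title (cur ++ ((pvSplitAtHeader lines).1.map PySem.Str.strip).filter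
            (fun s => s ≠ "")) ++
          (match (pvSplitAtHeader lines).2 with
           | [] => []
           | hd :: t => pvG [] (PySem.Str.strip (PySem.Str.stripChars hd "# ")) t) := by
  induction lines with
  | nil =>
    intro cur title
    simp [pvG, pvSplitAtHeader]
  | cons l ls ih =>
    intro cur title
    simp only [pvG, pvSplitAtHeader]
    by_cases h1 : PySem.Str.startswith l "#"
    · rw [if_pos h1, if_pos h1]
      simp
    · rw [if_neg h1, if_neg h1]
      simp only
      by_cases h2 : PySem.Str.strip l ≠ ""
      · rw [if_pos h2, ih]
        simp only [List.map_cons, List.filter_cons]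
        rw [if_pos (by simpa using h2)]
        simp [List.append_assoc]
      · rw [if_neg h2, ih]
        simp only [ne_eq, not_not] at h2
        simp [h2]

-- joining nonempty strings with "\n" gives "" only for the empty list
theorem pvJoin_cons_ne (x : String) (t : List String) (hx : x ≠ "") :
    PySem.Str.join "\n" (x :: t) ≠ "" := by
  cases t with
  | nil =>
    simpa [PySem.Str.join, PySem.Chars.join, List.intercalate] using hx
  | cons y t' =>
    intro h
    have := congrArg String.toList h
    simp [PySem.Str.join, PySem.Chars.join, List.intercalate] at this

theorem pvEmit_eq (title : String) (body : List String) :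
    pvEmit title body = pvFlush title ((body.map PySem.Str.strip).filter (fun s => s ≠ "")) := by
  unfold pvEmit pvFlush
  cases hf : (body.map PySem.Str.strip).filter (fun s => s ≠ "") with
  | nil => simp [PySem.Str.join, PySem.Chars.join, List.intercalate]
  | cons x t =>
    have hx : x ≠ "" := by
      have hmem : x ∈ x :: t := List.mem_cons_self
      rw [← hf] at hmem
      simpa using List.of_mem_filter hmem
    simp [pvJoin_cons_ne x t hx]

theorem pvG_eq_sections (n : Nat) : ∀ (lines : List String), lines.length ≤ n →
    ∀ (title : String), pvG [] title lines = pvSections title lines := by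
  induction n with
  | zero =>
    intro lines hlen title
    have : lines = [] := List.eq_nil_of_length_eq_zero (Nat.le_zero.mp hlen)
    subst this
    simp [pvG, pvSections, pvSplitAtHeader, pvEmit_eq, pvFlush]
  | succ n ih =>
    intro lines hlen title
    rw [pvG_split, pvSections, pvEmit_eq]
    simp only [List.nil_append]
    cases h : (pvSplitAtHeader lines).2 with
    | nil => simp
    | cons hd t =>
      have hle := pvSplitAtHeader_snd_length_le lines
      rw [h] at hle
      simp only []
      rw [ih t (by simp at hle; omega) _]

-- ===== VERDICT (by name: the statement is the Claim_ definition above) =====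
theorem extract_content_from_md_spec : Claim_equal_extract_content_from_md := by
  intro md _
  unfold Spec_extract_content_from_md extract_content_from_md extract_content_from_md_alt
  rw [pvA_loop _ [] [] ""]
  simp only [List.nil_append]
  exact pvG_eq_sections _ _ (Nat.le_refl _) _
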